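-- pv_equiv track=rewrite | github.com/juldyzmurat/csds391_assignments | 8_puzzle.py | apply_move
-- ===== SOURCE A (Python) =====
-- def apply_move(state, direction):
--     i, j = next((i, j) for i, row in enumerate(state) for j, val in enumerate(row) if val == 0)
--     new_state = [list(row) for row in state]
--
--     if direction == "up" and i > 0:
--         new_state[i][j], new_state[i-1][j] = new_state[i-1][j], new_state[i][j]
--     elif direction == "down" and i < 2:
--         new_state[i][j], new_state[i+1][j] = new_state[i+1][j], new_state[i][j]
--     elif direction == "left" and j > 0:
--         new_state[i][j], new_state[i][j-1] = new_state[i][j-1], new_state[i][j]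
--     elif direction == "right" and j < 2:
--         new_state[i][j], new_state[i][j+1] = new_state[i][j+1], new_state[i][j]
--     else:
--         return None
--
--     return tuple(map(tuple, new_state))
-- ===== SOURCE B (Python) =====
-- def apply_move(state, direction):
--     # Work on the flattened board: swap by flat-index offset arithmetic, then re-chunk.
--     flat = [v for row in state for v in row]
--     lens = [len(row) for row in state]
--     k = flat.index(0)
--     i, j = 0, k
--     while j >= lens[i]:
--         j -= lens[i]
--         i += 1
--     if direction == "up" and i > 0:
--         t = k - lens[i-1]
--     elif direction == "down" and i < 2:
--         t = k + lens[i]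
--     elif direction == "left" and j > 0:
--         t = k - 1
--     elif direction == "right" and j < 2:
--         t = k + 1
--     else:
--         return None
--     flat[k], flat[t] = flat[t], flat[k]
--     out, p = [], 0
--     for L in lens:
--         out.append(tuple(flat[p:p+L]))
--         p += L
--     return tuple(out)
-- ===== Notes on version B (the rewrite author's own statement) =====
-- stated objective: alternative
-- what changed: B works on the flattened 1-D board: it finds the blank by list.index on the flat list, converts the flat index to (row,col) by subtracting row lengths, performs the swap by flat-index offset arithmetic (+-row length or +-1) in the flat list, and re-chunks it into rows, instead of A's 2-D scan plus copy-the-grid-and-swap-two-cells.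
import Mathlib
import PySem

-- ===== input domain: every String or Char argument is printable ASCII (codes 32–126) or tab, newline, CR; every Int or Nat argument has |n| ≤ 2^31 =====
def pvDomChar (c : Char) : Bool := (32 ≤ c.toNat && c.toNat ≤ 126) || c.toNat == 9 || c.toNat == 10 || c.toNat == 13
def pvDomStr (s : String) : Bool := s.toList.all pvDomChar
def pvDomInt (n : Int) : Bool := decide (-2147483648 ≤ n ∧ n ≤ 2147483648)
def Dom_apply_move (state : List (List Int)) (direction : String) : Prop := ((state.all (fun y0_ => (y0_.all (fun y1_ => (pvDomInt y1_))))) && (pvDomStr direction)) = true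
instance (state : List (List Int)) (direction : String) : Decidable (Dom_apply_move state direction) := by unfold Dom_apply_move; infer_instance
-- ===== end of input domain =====

-- ===== PORT A =====
-- B replaces A's 2-D "copy the grid and swap two cells" by flattening the board to one
-- list, swapping by flat-index offset arithmetic and re-chunking (objective: alternative).

-- first j with row[j] = 0, scanning left to right (the inner generator of A's `next`)
def findZeroRow (row : List Int) (j : Nat) : Option Nat :=
  match row with
  | [] => none
  | v :: rest => if v = 0 then some j else findZeroRow rest (j + 1)

-- first (i, j) with state[i][j] = 0 (A's `next(...)`; none = StopIteration, excluded by Pre_)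
def findZero (state : List (List Int)) (i : Nat) : Option (Nat × Nat) :=
  match state with
  | [] => none
  | r :: rest =>
    match findZeroRow r 0 with
    | some j => some (i, j)
    | none => findZero rest (i + 1)

-- the simultaneous swap of cells (i,j) and (i',j') on a fresh copy of the grid;
-- none exactly where Python's indexing raises IndexError (excluded by Pre_)
def swapCells (g : List (List Int)) (i j i' j' : Nat) : Option (List (List Int)) :=
  match g[i]? with
  | none => none
  | some ri =>
    match ri[j]? with
    | none => none
    | some a =>
      match g[i']? with
      | none => none
      | some ri' =>
        match ri'[j']? with
        | none => none
        | some b =>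
          some ((g.modify i (fun r => r.set j b)).modify i' (fun r => r.set j' a))

def apply_move (state : List (List Int)) (direction : String) : Option (List (List Int)) :=
  match findZero state 0 with
  | none => none
  | some (i, j) =>
    if direction = "up" ∧ i > 0 then swapCells state i j (i - 1) j
    else if direction = "down" ∧ i < 2 then swapCells state i j (i + 1) j
    else if direction = "left" ∧ j > 0 then swapCells state i j i (j - 1)
    else if direction = "right" ∧ j < 2 then swapCells state i j i (j + 1)
    else none

-- ===== PORT B =====
-- Source B's `while j >= lens[i]: j -= lens[i]; i += 1` converting a flat index to (row, col);
-- the recursion walks the lens list exactly as the loop reads lens[i], lens[i+1], …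
-- (on [] Python would raise IndexError; unreachable inside Pre_)
def locGo (lens : List Nat) (i j : Nat) : Nat × Nat :=
  match lens with
  | [] => (i, j)
  | L :: rest => if j < L then (i, j) else locGo rest (i + 1) (j - L)

-- Source B's rebuild loop: out.append(flat[p:p+L]); p += L.  (flat.drop p).take L is exactly
-- Python's slice flat[p:p+L] on the natural bounds (PySem.List.slice_natCast_add).
def chunksGo (flat : List Int) (lens : List Nat) (p : Nat) : List (List Int) :=
  match lens with
  | [] => []
  | L :: rest => ((flat.drop p).take L) :: chunksGo flat rest (p + L)

def apply_move_alt (state : List (List Int)) (direction : String) : Option (List (List Int)) :=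
  let flat := state.flatMap (fun row => row)
  let lens := state.map List.length
  match PySem.List.index? flat 0 with
  | none => none          -- Python: flat.index(0) raises ValueError (excluded by Pre_)
  | some k =>
    match locGo lens 0 k with
    | (i, j) =>
      -- lens.getD _ 0: inside Pre_ the index is in range, matching Python's lens[_];
      -- Nat subtraction below never truncates inside Pre_ (k ≥ lens[i-1] when i > 0)
      let t? : Option Nat :=
        if direction = "up" ∧ i > 0 then some (k - lens.getD (i - 1) 0)
        else if direction = "down" ∧ i < 2 then some (k + lens.getD i 0)
        else if direction = "left" ∧ j > 0 then some (k - 1)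
        else if direction = "right" ∧ j < 2 then some (k + 1)
        else none
      match t? with
      | none => none
      | some t =>
        match flat[k]?, flat[t]? with   -- none = Python IndexError (excluded by Pre_)
        | some a, some b => some (chunksGo ((flat.set k b).set t a) lens 0)
        | _, _ => none

-- ===== PRECONDITION & SPEC =====
-- the position of the first 0 in row-major order (a condition on the INPUT; independent of the ports)
def blankPos (state : List (List Int)) : Option (Nat × Nat) :=
  match state.findIdx? (fun r => r.contains 0) with
  | none => none
  | some i => ((state[i]?.getD []).idxOf? 0).map (fun j => (i, j))

def rowOkB (state : List (List Int)) (r j : Nat) : Bool :=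
  decide (r < state.length) && decide (j < (state[r]?.getD []).length)

-- Pre_ admits exactly the inputs on which the Python A returns: a 0 must exist somewhere
-- (else A raises StopIteration), and the cell A swaps into must exist (else IndexError).
def preB (state : List (List Int)) (direction : String) : Bool :=
  match blankPos state with
  | none => false
  | some (i, j) =>
    (!(decide (direction = "up") && decide (0 < i)) || rowOkB state (i - 1) j) &&
    (!(decide (direction = "down") && decide (i < 2)) || rowOkB state (i + 1) j) &&
    (!(decide (direction = "right") && decide (j < 2)) || rowOkB state i (j + 1))

def Pre_apply_move (state : List (List Int)) (direction : String) : Prop :=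
  preB state direction = true
instance (state : List (List Int)) (direction : String) : Decidable (Pre_apply_move state direction) := by
  unfold Pre_apply_move; infer_instance

def pvWitness_apply_move : List (List Int) × String := ([[1, 2, 3], [4, 0, 5], [6, 7, 8]], "up")

def Spec_apply_move (state : List (List Int)) (direction : String) (out : Option (List (List Int))) : Prop := out = apply_move_alt state direction
instance (state : List (List Int)) (direction : String) (out : Option (List (List Int))) : Decidable (Spec_apply_move state direction out) := by
  unfold Spec_apply_move; infer_instance

-- ===== CLAIM (what is proved, stated in full; the proofs are below) =====
def Claim_equal_apply_move : Prop := ∀ (state : List (List Int)) (direction : String), Dom_apply_move state direction → Pre_apply_move state direction → Spec_apply_move state direction (apply_move state direction)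

-- ===== LEMMAS AND PROOFS =====

-- structural reformulation of the first-zero search, the anchor of all lemmas below
def fz (state : List (List Int)) : Option (Nat × Nat) :=
  match state with
  | [] => none
  | r :: rest =>
    match r.idxOf? 0 with
    | some j => some (0, j)
    | none => (fz rest).map (fun p => (p.1 + 1, p.2))

-- flat index of row i, column 0
def startIdx (state : List (List Int)) (r : Nat) : Nat :=
  (((state.map List.length).take r)).sum

theorem findZeroRow_eq_idxOf? (r : List Int) (n : Nat) :
    findZeroRow r n = (r.idxOf? 0).map (n + ·) := by
  induction r generalizing n with
  | nil => simp [findZeroRow]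
  | cons v rest ih =>
    by_cases hv : v = 0
    · simp [findZeroRow, hv, List.idxOf?_cons]
    · cases hx : rest.idxOf? 0 <;>
        simp [findZeroRow, hv, List.idxOf?_cons, ih, hx]; omega

theorem findZero_eq_fz_aux (state : List (List Int)) (n : Nat) :
    findZero state n = (fz state).map (fun p => (n + p.1, p.2)) := by
  induction state generalizing n with
  | nil => simp [findZero, fz]
  | cons r rest ih =>
    rw [findZero, findZeroRow_eq_idxOf?]
    cases hj : r.idxOf? 0 with
    | some j => simp [fz, hj]
    | none =>
      rw [ih]
      cases hb : fz rest <;> simp [fz, hj, hb]; omega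

theorem findZero_eq_fz (state : List (List Int)) : findZero state 0 = fz state := by
  rw [findZero_eq_fz_aux]; cases fz state <;> simp

theorem fz_eq_blankPos (state : List (List Int)) : fz state = blankPos state := by
  induction state with
  | nil => simp [fz, blankPos]
  | cons r rest ih =>
    rw [fz, blankPos, List.findIdx?_cons]
    by_cases hr : r.contains 0
    · rw [if_pos (by simpa using hr)]
      have : ∃ j, r.idxOf? 0 = some j := by
        rw [← Option.isSome_iff_exists, List.isSome_idxOf?]
        simpa using hr
      obtain ⟨j, hj⟩ := this
      simp [hj]
    · have hnone : r.idxOf? 0 = none := by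
        simp [List.idxOf?_eq_none_iff]; simpa using hr
      rw [if_neg (by simpa using hr), hnone, ih]
      unfold blankPos
      cases hb : rest.findIdx? (fun r => r.contains 0) with
      | none => simp
      | some i' => cases hj : (rest[i']?.getD []).idxOf? 0 <;> simp [hj]

theorem fz_bounds (state : List (List Int)) (i j : Nat) (h : fz state = some (i, j)) :
    i < state.length ∧ j < (state[i]?.getD []).length := by
  induction state generalizing i with
  | nil => simp [fz] at h
  | cons r rest ih =>
    rw [fz] at h
    cases hj : r.idxOf? 0 with
    | some j0 =>
      rw [hj] at h
      obtain ⟨hi, hjj⟩ : (0 : Nat) = i ∧ j0 = j := by simpa using h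
      subst hi; subst hjj
      obtain ⟨hlt, -⟩ := List.idxOf?_eq_some_iff.mp hj
      exact ⟨by simp, by simpa using hlt⟩
    | none =>
      rw [hj] at h
      cases hb : fz rest with
      | none => rw [hb] at h; simp at h
      | some p =>
        rw [hb] at h
        obtain ⟨i', j'⟩ := p
        obtain ⟨hi, hjj⟩ : i' + 1 = i ∧ j' = j := by simpa using h
        subst hi; subst hjj
        obtain ⟨h1, h2⟩ := ih i' hb
        exact ⟨by simpa using h1, by simpa using h2⟩

theorem startIdx_zero (state : List (List Int)) : startIdx state 0 = 0 := by simp [startIdx]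

theorem startIdx_cons_succ (r : List Int) (rest : List (List Int)) (i : Nat) :
    startIdx (r :: rest) (i + 1) = r.length + startIdx rest i := by
  simp [startIdx]

theorem startIdx_succ (state : List (List Int)) (r : Nat) (hr : r < state.length) :
    startIdx state (r + 1) = startIdx state r + (state[r]?.getD []).length := by
  induction state generalizing r with
  | nil => simp at hr
  | cons x rest ih =>
    cases r with
    | zero => simp [startIdx_cons_succ, startIdx_zero]
    | succ r' =>
      rw [startIdx_cons_succ, startIdx_cons_succ, ih r' (by simpa using hr)]
      simp; omega

theorem idxOf?_append (l₁ l₂ : List Int) (v : Int) :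
    (l₁ ++ l₂).idxOf? v =
      match l₁.idxOf? v with
      | some n => some n
      | none => (l₂.idxOf? v).map (l₁.length + ·) := by
  induction l₁ with
  | nil => cases h : l₂.idxOf? v <;> simp [h]
  | cons a rest ih =>
    by_cases ha : a = v
    · simp [List.idxOf?_cons, ha]
    · rw [List.cons_append, List.idxOf?_cons, List.idxOf?_cons, ih]
      cases h1 : rest.idxOf? v with
      | some n => simp [ha]
      | none =>
        cases h2 : l₂.idxOf? v <;> simp [ha]; omega

theorem flat_idxOf (state : List (List Int)) (i j : Nat) (h : fz state = some (i, j)) :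
    (state.flatMap (fun row => row)).idxOf? 0 = some (startIdx state i + j) := by
  induction state generalizing i with
  | nil => simp [fz] at h
  | cons r rest ih =>
    rw [fz] at h
    rw [List.flatMap_cons, idxOf?_append]
    cases hj : r.idxOf? 0 with
    | some j0 =>
      rw [hj] at h
      obtain ⟨hi, hjj⟩ : (0 : Nat) = i ∧ j0 = j := by simpa using h
      subst hi; subst hjj
      simp [startIdx_zero]
    | none =>
      rw [hj] at h
      cases hb : fz rest with
      | none => rw [hb] at h; simp at h
      | some p =>
        rw [hb] at h
        obtain ⟨i', j'⟩ := p
        obtain ⟨hi, hjj⟩ : i' + 1 = i ∧ j' = j := by simpa using h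
        subst hi; subst hjj
        rw [ih i' hb]
        simp [startIdx_cons_succ]; omega

theorem locGo_start (state : List (List Int)) (i j a : Nat)
    (hi : i < state.length) (hj : j < (state[i]?.getD []).length) :
    locGo (state.map List.length) a (startIdx state i + j) = (a + i, j) := by
  induction state generalizing i a with
  | nil => simp at hi
  | cons r rest ih =>
    cases i with
    | zero =>
      simp only [startIdx_zero, Nat.zero_add]
      rw [List.map_cons, locGo, if_pos (by simpa using hj)]
      simp
    | succ i' =>
      rw [List.map_cons, locGo, startIdx_cons_succ]
      rw [if_neg (by omega)]
      have := ih i' (a + 1) (by simpa using hi) (by simpa using hj)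
      rw [show r.length + startIdx rest i' + j - r.length = startIdx rest i' + j by omega, this]
      simp; omega

theorem flat_get (state : List (List Int)) (i j : Nat)
    (hi : i < state.length) (hj : j < (state[i]?.getD []).length) :
    (state.flatMap (fun row => row))[startIdx state i + j]? = (state[i]?.getD [])[j]? := by
  induction state generalizing i with
  | nil => simp at hi
  | cons r rest ih =>
    cases i with
    | zero =>
      rw [startIdx_zero, Nat.zero_add, List.flatMap_cons]
      rw [List.getElem?_append_left (by simpa using hj)]
      simp
    | succ i' =>
      rw [List.flatMap_cons, startIdx_cons_succ,
        List.getElem?_append_right (by omega)]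
      rw [show r.length + startIdx rest i' + j - r.length = startIdx rest i' + j by omega]
      rw [ih i' (by simpa using hi) (by simpa using hj)]
      simp

theorem flat_set (state : List (List Int)) (i j : Nat) (v : Int)
    (hi : i < state.length) (hj : j < (state[i]?.getD []).length) :
    (state.flatMap (fun row => row)).set (startIdx state i + j) v
      = (state.modify i (fun r => r.set j v)).flatMap (fun row => row) := by
  induction state generalizing i with
  | nil => simp at hi
  | cons r rest ih =>
    cases i with
    | zero =>
      rw [startIdx_zero, Nat.zero_add, List.flatMap_cons, List.set_append,
        if_pos (by simpa using hj)]
      simp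
    | succ i' =>
      rw [List.flatMap_cons, startIdx_cons_succ, List.set_append, if_neg (by omega)]
      rw [show r.length + startIdx rest i' + j - r.length = startIdx rest i' + j by omega]
      rw [ih i' (by simpa using hi) (by simpa using hj)]
      simp

theorem map_length_modify_set (state : List (List Int)) (i j : Nat) (v : Int) :
    (state.modify i (fun r => r.set j v)).map List.length = state.map List.length := by
  induction state generalizing i with
  | nil => simp
  | cons r rest ih =>
    cases i with
    | zero => simp
    | succ i' => simp [ih]

theorem chunksGo_flat (state : List (List Int)) (flat : List Int) (p : Nat)
    (h : flat.drop p = state.flatMap (fun row => row)) :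
    chunksGo flat (state.map List.length) p = state := by
  induction state generalizing p with
  | nil => simp [chunksGo]
  | cons r rest ih =>
    rw [List.map_cons, chunksGo, h, List.flatMap_cons]
    rw [List.take_left]
    congr 1
    apply ih
    have h2 := congrArg (List.drop r.length) h
    simpa [List.drop_drop, Nat.add_comm, List.flatMap_cons, List.drop_left] using h2

theorem lens_getD (state : List (List Int)) (r : Nat) :
    (state.map List.length).getD r 0 = (state[r]?.getD []).length := by
  cases h : state[r]? <;> simp [List.getD_eq_getElem?_getD, List.getElem?_map, h]

theorem len_row_modify (state : List (List Int)) (i j : Nat) (v : Int) (r : Nat) :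
    (((state.modify i (fun row => row.set j v))[r]?.getD []).length)
      = ((state[r]?.getD []).length) := by
  have h := congrArg (fun l => l[r]?) (map_length_modify_set state i j v)
  simp only [List.getElem?_map] at h
  cases h1 : (state.modify i (fun row => row.set j v))[r]? <;>
    cases h2 : state[r]? <;> rw [h1, h2] at h <;> simp_all

theorem row_some (g : List (List Int)) (i : Nat) (hi : i < g.length) :
    g[i]? = some (g[i]?.getD []) := by
  rw [List.getElem?_eq_getElem hi]; simp

theorem flatSwap_eq_swapCells (state : List (List Int)) (i j i' j' : Nat) (a b : Int)
    (hi : i < state.length) (hj : j < (state[i]?.getD []).length)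
    (hi' : i' < state.length) (hj' : j' < (state[i']?.getD []).length)
    (ha : (state[i]?.getD [])[j]? = some a) (hb : (state[i']?.getD [])[j']? = some b) :
    swapCells state i j i' j'
      = some (chunksGo (((state.flatMap (fun row => row)).set (startIdx state i + j) b).set
          (startIdx state i' + j') a) (state.map List.length) 0) := by
  have e1 := flat_set state i j b hi hj
  have hlen1 := map_length_modify_set state i j b
  have hi'1 : i' < (state.modify i (fun r => r.set j b)).length := by
    simpa using hi'
  have hj'1 : j' < ((state.modify i (fun r => r.set j b))[i']?.getD []).length := by
    rw [len_row_modify]; exact hj'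
  have e3 := flat_set (state.modify i (fun r => r.set j b)) i' j' a hi'1 hj'1
  have hs : startIdx (state.modify i (fun r => r.set j b)) i' = startIdx state i' := by
    unfold startIdx; rw [hlen1]
  have hlen2 := map_length_modify_set (state.modify i (fun r => r.set j b)) i' j' a
  rw [e1, ← hs, e3]
  rw [swapCells, row_some state i hi, row_some state i' hi']
  simp only [ha, hb]
  rw [show state.map List.length
      = ((state.modify i (fun r => r.set j b)).modify i' (fun r => r.set j' a)).map List.length
      from (hlen2.trans hlen1).symm]
  rw [chunksGo_flat _ _ 0 (by simp)]

-- ===== VERDICT (by name: the statement is the Claim_ definition above) =====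
set_option maxHeartbeats 2000000 in
theorem apply_move_spec : Claim_equal_apply_move := by
  intro state direction _ hpre
  unfold Spec_apply_move
  cases hbp : blankPos state with
  | none => exfalso; unfold Pre_apply_move preB at hpre; rw [hbp] at hpre; simp at hpre
  | some p =>
    obtain ⟨i, j⟩ := p
    have hfz : fz state = some (i, j) := by rw [fz_eq_blankPos, hbp]
    have hz : findZero state 0 = some (i, j) := by rw [findZero_eq_fz, hfz]
    obtain ⟨hi, hj⟩ := fz_bounds state i j hfz
    have hk := flat_idxOf state i j hfz
    have hloc : locGo (state.map List.length) 0 (startIdx state i + j) = (i, j) := by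
      simpa using locGo_start state i j 0 hi hj
    unfold Pre_apply_move preB at hpre
    rw [hbp] at hpre
    simp only [Bool.and_eq_true, Bool.or_eq_true, Bool.not_eq_true', Bool.and_eq_false_iff,
      decide_eq_false_iff_not, decide_eq_true_eq, rowOkB] at hpre
    simp only [apply_move, apply_move_alt, hz, PySem.List.index?_eq_idxOf?, hk, hloc]
    have haex : ∃ a, (state[i]?.getD [])[j]? = some a := ⟨_, List.getElem?_eq_getElem hj⟩
    obtain ⟨a, ha⟩ := haex
    have hka : (state.flatMap (fun row => row))[startIdx state i + j]? = some a := by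
      rw [flat_get state i j hi hj]; exact ha
    by_cases h1 : direction = "up" ∧ 0 < i
    · obtain ⟨hup, hipos⟩ := h1
      have hro : i - 1 < state.length ∧ j < (state[i - 1]?.getD []).length := by
        rcases hpre.1.1 with h | h
        · exfalso; tauto
        · exact h
      obtain ⟨b, hb⟩ := (⟨_, List.getElem?_eq_getElem hro.2⟩ : ∃ b, (state[i - 1]?.getD [])[j]? = some b)
      have hkb : (state.flatMap (fun row => row))[startIdx state (i - 1) + j]? = some b := by
        rw [flat_get state (i - 1) j hro.1 hro.2]; exact hb
      have hstart : startIdx state i = startIdx state (i - 1) + (state[i - 1]?.getD []).length := by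
        have := startIdx_succ state (i - 1) hro.1
        rwa [show i - 1 + 1 = i by omega] at this
      have ht : startIdx state i + j - (state.map List.length).getD (i - 1) 0
          = startIdx state (i - 1) + j := by rw [lens_getD]; omega
      rw [if_pos ⟨hup, hipos⟩, if_pos ⟨hup, hipos⟩]
      simp only [ht, hka, hkb]
      exact flatSwap_eq_swapCells state i j (i - 1) j a b hi hj hro.1 hro.2 ha hb
    · have hn1 : ¬(direction = "up" ∧ i > 0) := by tauto
      rw [if_neg hn1, if_neg hn1]
      by_cases h2 : direction = "down" ∧ i < 2
      · obtain ⟨hdn, hilt⟩ := h2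
        have hro : i + 1 < state.length ∧ j < (state[i + 1]?.getD []).length := by
          rcases hpre.1.2 with h | h
          · exfalso; tauto
          · exact h
        obtain ⟨b, hb⟩ := (⟨_, List.getElem?_eq_getElem hro.2⟩ : ∃ b, (state[i + 1]?.getD [])[j]? = some b)
        have hkb : (state.flatMap (fun row => row))[startIdx state (i + 1) + j]? = some b := by
          rw [flat_get state (i + 1) j hro.1 hro.2]; exact hb
        have hstart := startIdx_succ state i hi
        have ht : startIdx state i + j + (state.map List.length).getD i 0
            = startIdx state (i + 1) + j := by rw [lens_getD]; omega
        rw [if_pos ⟨hdn, hilt⟩, if_pos ⟨hdn, hilt⟩]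
        simp only [ht, hka, hkb]
        exact flatSwap_eq_swapCells state i j (i + 1) j a b hi hj hro.1 hro.2 ha hb
      · have hn2 : ¬(direction = "down" ∧ i < 2) := by tauto
        rw [if_neg hn2, if_neg hn2]
        by_cases h3 : direction = "left" ∧ 0 < j
        · obtain ⟨hlf, hjpos⟩ := h3
          have hro : j - 1 < (state[i]?.getD []).length := by omega
          obtain ⟨b, hb⟩ := (⟨_, List.getElem?_eq_getElem hro⟩ : ∃ b, (state[i]?.getD [])[j - 1]? = some b)
          have hkb : (state.flatMap (fun row => row))[startIdx state i + (j - 1)]? = some b := by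
            rw [flat_get state i (j - 1) hi hro]; exact hb
          have ht : startIdx state i + j - 1 = startIdx state i + (j - 1) := by omega
          rw [if_pos ⟨hlf, hjpos⟩, if_pos ⟨hlf, hjpos⟩]
          simp only [ht, hka, hkb]
          exact flatSwap_eq_swapCells state i j i (j - 1) a b hi hj hi hro ha hb
        · have hn3 : ¬(direction = "left" ∧ j > 0) := by tauto
          rw [if_neg hn3, if_neg hn3]
          by_cases h4 : direction = "right" ∧ j < 2
          · obtain ⟨hrt, hjlt⟩ := h4
            have hro : j + 1 < (state[i]?.getD []).length := by
              rcases hpre.2 with h | h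
              · exfalso; tauto
              · exact h.2
            obtain ⟨b, hb⟩ := (⟨_, List.getElem?_eq_getElem hro⟩ : ∃ b, (state[i]?.getD [])[j + 1]? = some b)
            have hkb : (state.flatMap (fun row => row))[startIdx state i + (j + 1)]? = some b := by
              rw [flat_get state i (j + 1) hi hro]; exact hb
            have ht : startIdx state i + j + 1 = startIdx state i + (j + 1) := by omega
            rw [if_pos ⟨hrt, hjlt⟩, if_pos ⟨hrt, hjlt⟩]
            simp only [ht, hka, hkb]
            exact flatSwap_eq_swapCells state i j i (j + 1) a b hi hj hi hro ha hb
          · have hn4 : ¬(direction = "right" ∧ j < 2) := by tauto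
            rw [if_neg hn4, if_neg hn4]
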